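-- pv_equiv track=rewrite | github.com/harunardi/dissertation_codes | SRC/XSPROCESS_3D_RECT.py | convert_index_3D_rect
-- ===== SOURCE A (Python) =====
-- def convert_index_3D_rect(D, I_max, J_max, K_max):
--     conv = [0] * (I_max * J_max * K_max)
--     tmp_conv = 0
--     for k in range(K_max):
--         for j in range(J_max):
--             for i in range(I_max):
--                 if D[0][k][j][i] != 0:
--                     tmp_conv += 1
--                     m = k * (I_max * J_max) + j * I_max + i
--                     conv[m] = tmp_conv
--     return conv
-- ===== SOURCE B (Python) =====
-- def convert_index_3D_rect(D, I_max, J_max, K_max):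
--     if I_max > 0 and J_max > 0 and K_max > 0:
--         # phase 1: flatten the grid's nonzero mask in C order (k, j, i)
--         mask = [D[0][k][j][i] != 0
--                 for k in range(K_max) for j in range(J_max) for i in range(I_max)]
--         # phase 2: prefix-sum table of the mask (running count of nonzeros)
--         cum = []
--         total = 0
--         for m in mask:
--             total += m
--             cum.append(total)
--         # phase 3: keep the running count at nonzero cells, 0 elsewhere
--         return [c if m else 0 for m, c in zip(mask, cum)]
--     return [0] * (I_max * J_max * K_max)
-- ===== Notes on version B (the rewrite author's own statement) =====
-- stated objective: alternative
-- what changed: A fills a preallocated flat array by writing a single running counter at a computed 3D offset inside one triple-loop scan; B instead flattens the nonzero mask of D[0] in C order, builds a prefix-sum table of that mask in a separate pass, and then maps mask/prefix pairs to the output (count at nonzero cells, 0 elsewhere).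
import Mathlib
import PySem

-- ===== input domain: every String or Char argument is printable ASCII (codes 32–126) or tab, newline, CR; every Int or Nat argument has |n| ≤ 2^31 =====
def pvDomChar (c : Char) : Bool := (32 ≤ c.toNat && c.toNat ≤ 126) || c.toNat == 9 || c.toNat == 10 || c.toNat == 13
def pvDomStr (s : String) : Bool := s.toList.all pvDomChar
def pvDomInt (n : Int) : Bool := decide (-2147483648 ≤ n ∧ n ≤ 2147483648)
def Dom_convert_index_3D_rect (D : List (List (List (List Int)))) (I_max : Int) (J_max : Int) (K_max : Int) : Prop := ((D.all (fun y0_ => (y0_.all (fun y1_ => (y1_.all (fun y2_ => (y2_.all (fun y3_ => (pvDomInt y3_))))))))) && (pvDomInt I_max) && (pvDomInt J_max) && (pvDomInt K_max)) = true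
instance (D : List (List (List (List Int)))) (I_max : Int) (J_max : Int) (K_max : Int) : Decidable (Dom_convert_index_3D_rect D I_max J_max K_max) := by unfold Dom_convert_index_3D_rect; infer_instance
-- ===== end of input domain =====

-- B replaces A's inline running-counter scan with a three-phase decomposition
-- (flatten a nonzero mask in C order, build a prefix-sum table, mask it back);
-- objective: alternative decomposition, same asymptotic cost.

-- ===== PORT A =====
def convert_index_3D_rect (D : List (List (List (List Int)))) (I_max : Int) (J_max : Int) (K_max : Int) : List Int :=
  let conv : List Int := List.replicate (I_max * J_max * K_max).toNat 0
  ((PySem.List.pyRange 0 K_max 1).foldl (fun st k =>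
    (PySem.List.pyRange 0 J_max 1).foldl (fun st j =>
      (PySem.List.pyRange 0 I_max 1).foldl (fun st i =>
        if PySem.List.pyGetD (PySem.List.pyGetD (PySem.List.pyGetD (PySem.List.pyGetD D 0 []) k []) j []) i 0 ≠ 0 then
          (st.1.set (k * (I_max * J_max) + j * I_max + i).toNat (st.2 + 1), st.2 + 1)
        else st) st) st) (conv, (0 : Int))).1

-- ===== PORT B =====
def convert_index_3D_rect_alt (D : List (List (List (List Int)))) (I_max : Int) (J_max : Int) (K_max : Int) : List Int :=
  if 0 < I_max ∧ 0 < J_max ∧ 0 < K_max then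
    let mask : List Bool := (PySem.List.pyRange 0 K_max 1).flatMap (fun k =>
      (PySem.List.pyRange 0 J_max 1).flatMap (fun j =>
        (PySem.List.pyRange 0 I_max 1).map (fun i =>
          PySem.List.pyGetD (PySem.List.pyGetD (PySem.List.pyGetD (PySem.List.pyGetD D 0 []) k []) j []) i 0 != 0)))
    let cum : List Int := (mask.foldl (fun (p : List Int × Int) m =>
        (p.1 ++ [p.2 + (if m then 1 else 0)], p.2 + (if m then 1 else 0))) ([], 0)).1
    (mask.zip cum).map (fun p => if p.1 then p.2 else 0)
  else List.replicate (I_max * J_max * K_max).toNat 0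

-- ===== PRECONDITION & SPEC =====
-- Pre_ excludes exactly the inputs where Python A raises an IndexError: when all three
-- dimensions are positive the loops read D[0][k][j][i] for every k<K_max, j<J_max, i<I_max,
-- so D must be nonempty and D[0] must be at least K_max×J_max×I_max.
def Pre_convert_index_3D_rect (D : List (List (List (List Int)))) (I_max : Int) (J_max : Int) (K_max : Int) : Prop :=
  (0 < I_max ∧ 0 < J_max ∧ 0 < K_max) →
    D ≠ [] ∧ K_max ≤ (D.headI.length : Int) ∧
      ∀ g ∈ D.headI.take K_max.toNat, J_max ≤ (g.length : Int) ∧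
        ∀ r ∈ g.take J_max.toNat, I_max ≤ (r.length : Int)
instance (D : List (List (List (List Int)))) (I_max : Int) (J_max : Int) (K_max : Int) : Decidable (Pre_convert_index_3D_rect D I_max J_max K_max) := by unfold Pre_convert_index_3D_rect; infer_instance

def pvWitness_convert_index_3D_rect : List (List (List (List Int))) × Int × Int × Int :=
  ([[[[1, 0], [2, 3]]]], 2, 2, 1)

def Spec_convert_index_3D_rect (D : List (List (List (List Int)))) (I_max : Int) (J_max : Int) (K_max : Int) (out : List Int) : Prop := out = convert_index_3D_rect_alt D I_max J_max K_max
instance (D : List (List (List (List Int)))) (I_max : Int) (J_max : Int) (K_max : Int) (out : List Int) : Decidable (Spec_convert_index_3D_rect D I_max J_max K_max out) := by unfold Spec_convert_index_3D_rect; infer_instance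

-- ===== CLAIM (what is proved, stated in full; the proofs are below) =====
def Claim_equal_convert_index_3D_rect : Prop := ∀ (D : List (List (List (List Int)))) (I_max : Int) (J_max : Int) (K_max : Int), Dom_convert_index_3D_rect D I_max J_max K_max → Pre_convert_index_3D_rect D I_max J_max K_max → Spec_convert_index_3D_rect D I_max J_max K_max (convert_index_3D_rect D I_max J_max K_max)

-- ===== LEMMAS AND PROOFS =====

-- A's write pattern: set sequential positions to the running count.
def pvSetRun : List Int → List Int × Int → Nat → List Int × Int
  | [], st, _ => st
  | v :: t, st, p => pvSetRun t (if v ≠ 0 then (st.1.set p (st.2 + 1), st.2 + 1) else st) (p + 1)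

-- common single-pass specification of the result
def pvGo : List Int → Int → List Int
  | [], _ => []
  | v :: t, c => if v ≠ 0 then (c + 1) :: pvGo t (c + 1) else 0 :: pvGo t c

def pvCnt : List Int → Int → Int
  | [], c => c
  | v :: t, c => pvCnt t (if v ≠ 0 then c + 1 else c)

theorem pvSet_append (acc : List Int) (w : Int) (z : List Int) (x : Int) :
    (acc ++ w :: z).set acc.length x = acc ++ x :: z := by
  induction acc with
  | nil => rfl
  | cons a t ih => simp [ih]

theorem pvSetRun_spec (vs : List Int) (acc : List Int) (c : Int) :
    pvSetRun vs (acc ++ List.replicate vs.length 0, c) acc.length = (acc ++ pvGo vs c, pvCnt vs c) := by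
  induction vs generalizing acc c with
  | nil => simp [pvSetRun, pvGo, pvCnt]
  | cons v t ih =>
    rw [List.length_cons, List.replicate_succ, pvSetRun]
    by_cases hv : v = 0
    · rw [if_neg (by simp [hv]), List.append_cons,
        show acc.length + 1 = (acc ++ [(0 : Int)]).length by simp,
        ih (acc ++ [(0 : Int)]) c]
      simp [pvGo, pvCnt, hv]
    · rw [if_pos hv, pvSet_append, List.append_cons,
        show acc.length + 1 = (acc ++ [c + 1]).length by simp,
        ih (acc ++ [c + 1]) (c + 1)]
      simp [pvGo, pvCnt, hv]

theorem pvSetRun_append (xs ys : List Int) (st : List Int × Int) (p : Nat) :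
    pvSetRun (xs ++ ys) st p = pvSetRun ys (pvSetRun xs st p) (p + xs.length) := by
  induction xs generalizing st p with
  | nil => simp [pvSetRun]
  | cons v t ih =>
    simp only [List.cons_append, pvSetRun, List.length_cons]
    rw [ih]
    congr 1
    omega

theorem pvToNat_mul (a b : Int) (ha : 0 ≤ a) (hb : 0 ≤ b) : (a * b).toNat = a.toNat * b.toNat := by
  obtain ⟨m, rfl⟩ := Int.eq_ofNat_of_zero_le ha
  obtain ⟨n, rfl⟩ := Int.eq_ofNat_of_zero_le hb
  rw [← Int.natCast_mul, Int.toNat_natCast, Int.toNat_natCast, Int.toNat_natCast]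

theorem pvFold_blocks (body : List Int × Int → Int → List Int × Int)
    (blk : Int → List Int) (L : Nat) (p0 : Nat) (b : Int)
    (hbody : ∀ st j, 0 ≤ j → j < b → body st j = pvSetRun (blk j) st (p0 + j.toNat * L))
    (hlen : ∀ j, 0 ≤ j → j < b → (blk j).length = L) :
    ∀ (n : Nat) (a : Int) (st : List Int × Int), 0 ≤ a → (b - a).toNat ≤ n →
      (PySem.List.pyRange a b 1).foldl body st
        = pvSetRun ((PySem.List.pyRange a b 1).flatMap blk) st (p0 + a.toNat * L) := by
  intro n
  induction n with
  | zero =>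
    intro a st ha hle
    have hba : b ≤ a := by omega
    simp [PySem.List.pyRange_one_eq_nil hba, pvSetRun]
  | succ n ih =>
    intro a st ha hle
    by_cases hab : a < b
    · rw [PySem.List.pyRange_one_cons hab]
      simp only [List.foldl_cons, List.flatMap_cons]
      rw [pvSetRun_append, hbody st a ha hab]
      have hpos : p0 + a.toNat * L + (blk a).length = p0 + (a + 1).toNat * L := by
        rw [hlen a ha hab]
        have : (a + 1).toNat = a.toNat + 1 := by omega
        rw [this, Nat.succ_mul]; omega
      rw [hpos]
      exact ih (a + 1) _ (by omega) (by omega)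
    · have hba : b ≤ a := by omega
      simp [PySem.List.pyRange_one_eq_nil hba, pvSetRun]

theorem pvFoldl_id {α β : Type} (l : List α) (st : β) : l.foldl (fun s _ => s) st = st := by
  induction l <;> simp_all

theorem pvFlatMap_single {α β : Type} (g : α → β) (l : List α) :
    l.flatMap (fun x => [g x]) = l.map g := by
  induction l <;> simp_all

-- A's triple loop (with f abstracting the grid lookup) computes the single-pass spec pvGo
-- over the C-order flattening.
theorem pvMain (f : Int → Int → Int → Int) (I J K : Int) (hI : 0 < I) (hJ : 0 < J) (hK : 0 < K) :
    ((PySem.List.pyRange 0 K 1).foldl (fun st k =>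
      (PySem.List.pyRange 0 J 1).foldl (fun st j =>
        (PySem.List.pyRange 0 I 1).foldl (fun st i =>
          if f k j i ≠ 0 then (st.1.set (k * (I * J) + j * I + i).toNat (st.2 + 1), st.2 + 1)
          else st) st) st) (List.replicate (I * J * K).toNat 0, (0 : Int))).1
    = pvGo ((PySem.List.pyRange 0 K 1).flatMap (fun k =>
        (PySem.List.pyRange 0 J 1).flatMap (fun j =>
          (PySem.List.pyRange 0 I 1).map (f k j)))) 0 := by
  have lenRow : ∀ k j, ((PySem.List.pyRange 0 I 1).map (f k j)).length = I.toNat := by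
    intro k j; simp [PySem.List.length_pyRange_one]
  have inner : ∀ k j, 0 ≤ k → 0 ≤ j → ∀ st : List Int × Int,
      (PySem.List.pyRange 0 I 1).foldl (fun st i =>
          if f k j i ≠ 0 then (st.1.set (k * (I * J) + j * I + i).toNat (st.2 + 1), st.2 + 1)
          else st) st
        = pvSetRun ((PySem.List.pyRange 0 I 1).map (f k j)) st ((k * (I * J) + j * I).toNat) := by
    intro k j hk hj st
    have hq1 : 0 ≤ k * (I * J) := mul_nonneg hk (mul_nonneg hI.le hJ.le)
    have hq2 : 0 ≤ j * I := mul_nonneg hj hI.le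
    have h := pvFold_blocks
      (fun st i => if f k j i ≠ 0 then (st.1.set (k * (I * J) + j * I + i).toNat (st.2 + 1), st.2 + 1) else st)
      (fun i => [f k j i]) 1 ((k * (I * J) + j * I).toNat) I
      (by
        intro st i hi0 hiI
        have harith : (k * (I * J) + j * I + i).toNat = (k * (I * J) + j * I).toNat + i.toNat * 1 := by
          omega
        simp [pvSetRun, harith])
      (by intro j' _ _; rfl)
      I.toNat 0 st le_rfl (by omega)
    rw [pvFlatMap_single] at h
    simpa using h
  have middle : ∀ k, 0 ≤ k → ∀ st : List Int × Int,
      (PySem.List.pyRange 0 J 1).foldl (fun st j =>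
        (PySem.List.pyRange 0 I 1).foldl (fun st i =>
          if f k j i ≠ 0 then (st.1.set (k * (I * J) + j * I + i).toNat (st.2 + 1), st.2 + 1)
          else st) st) st
        = pvSetRun ((PySem.List.pyRange 0 J 1).flatMap (fun j => (PySem.List.pyRange 0 I 1).map (f k j)))
            st ((k * (I * J)).toNat) := by
    intro k hk st
    have hq1 : 0 ≤ k * (I * J) := mul_nonneg hk (mul_nonneg hI.le hJ.le)
    have h := pvFold_blocks
      (fun st j =>
        (PySem.List.pyRange 0 I 1).foldl (fun st i =>
          if f k j i ≠ 0 then (st.1.set (k * (I * J) + j * I + i).toNat (st.2 + 1), st.2 + 1)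
          else st) st)
      (fun j => (PySem.List.pyRange 0 I 1).map (f k j)) I.toNat ((k * (I * J)).toNat) J
      (by
        intro st j hj0 hjJ
        have hq2 : 0 ≤ j * I := mul_nonneg hj0 hI.le
        have hpos : (k * (I * J) + j * I).toNat = (k * (I * J)).toNat + j.toNat * I.toNat := by
          have := pvToNat_mul j I hj0 hI.le
          omega
        dsimp only
        rw [inner k j hk hj0 st, hpos])
      (by intro j _ _; exact lenRow k j)
      J.toNat 0 st le_rfl (by omega)
    simpa using h
  have lenBlk : ∀ k, ((PySem.List.pyRange 0 J 1).flatMap (fun j => (PySem.List.pyRange 0 I 1).map (f k j))).length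
      = J.toNat * I.toNat := by
    intro k
    simp [List.length_flatMap, List.map_const', List.sum_replicate, smul_eq_mul,
      PySem.List.length_pyRange_one]
  have outer := pvFold_blocks
    (fun st k =>
      (PySem.List.pyRange 0 J 1).foldl (fun st j =>
        (PySem.List.pyRange 0 I 1).foldl (fun st i =>
          if f k j i ≠ 0 then (st.1.set (k * (I * J) + j * I + i).toNat (st.2 + 1), st.2 + 1)
          else st) st) st)
    (fun k => (PySem.List.pyRange 0 J 1).flatMap (fun j => (PySem.List.pyRange 0 I 1).map (f k j)))
    (J.toNat * I.toNat) 0 K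
    (by
      intro st k hk0 hkK
      have hpos : (k * (I * J)).toNat = 0 + k.toNat * (J.toNat * I.toNat) := by
        rw [pvToNat_mul k (I * J) hk0 (mul_nonneg hI.le hJ.le),
          pvToNat_mul I J hI.le hJ.le, Nat.zero_add, Nat.mul_comm I.toNat J.toNat]
      dsimp only
      rw [middle k hk0 st, hpos])
    (by intro k _ _; exact lenBlk k)
    K.toNat 0 (List.replicate (I * J * K).toNat 0, (0 : Int)) le_rfl (by omega)
  have hlenflat : ((PySem.List.pyRange 0 K 1).flatMap (fun k =>
      (PySem.List.pyRange 0 J 1).flatMap (fun j => (PySem.List.pyRange 0 I 1).map (f k j)))).length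
      = (I * J * K).toNat := by
    rw [List.length_flatMap]
    have : ((PySem.List.pyRange 0 K 1).map (fun k => ((PySem.List.pyRange 0 J 1).flatMap
        (fun j => (PySem.List.pyRange 0 I 1).map (f k j))).length))
        = (PySem.List.pyRange 0 K 1).map (fun _ => J.toNat * I.toNat) :=
      List.map_congr_left (fun k _ => lenBlk k)
    rw [this, List.map_const', List.sum_replicate, smul_eq_mul,
      PySem.List.length_pyRange_one,
      pvToNat_mul (I * J) K (mul_nonneg hI.le hJ.le) hK.le,
      pvToNat_mul I J hI.le hJ.le]
    ring_nf
  rw [outer]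
  have h0 := pvSetRun_spec ((PySem.List.pyRange 0 K 1).flatMap (fun k =>
      (PySem.List.pyRange 0 J 1).flatMap (fun j => (PySem.List.pyRange 0 I 1).map (f k j)))) [] 0
  simp only [List.nil_append, List.length_nil] at h0
  rw [hlenflat] at h0
  simp only [Int.toNat_zero, Nat.zero_mul, Nat.add_zero]
  rw [h0]

-- B-side: prefix-sum table and masking
def pvPref : List Bool → Int → List Int
  | [], _ => []
  | b :: t, c => (c + if b then 1 else 0) :: pvPref t (c + if b then 1 else 0)

def pvTot : List Bool → Int → Int
  | [], c => c
  | b :: t, c => pvTot t (c + if b then 1 else 0)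

def pvGoB : List Bool → Int → List Int
  | [], _ => []
  | b :: t, c => if b then (c + 1) :: pvGoB t (c + 1) else 0 :: pvGoB t c

theorem pvCum_spec (bs : List Bool) (acc : List Int) (c : Int) :
    bs.foldl (fun (p : List Int × Int) m =>
        (p.1 ++ [p.2 + (if m then 1 else 0)], p.2 + (if m then 1 else 0))) (acc, c)
      = (acc ++ pvPref bs c, pvTot bs c) := by
  induction bs generalizing acc c with
  | nil => simp [pvPref, pvTot]
  | cons b t ih =>
    simp only [List.foldl_cons, pvPref, pvTot]
    rw [ih]
    simp

theorem pvZipPref (bs : List Bool) (c : Int) :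
    (bs.zip (pvPref bs c)).map (fun p => if p.1 then p.2 else 0) = pvGoB bs c := by
  induction bs generalizing c with
  | nil => simp [pvPref, pvGoB]
  | cons b t ih =>
    simp only [pvPref, List.zip_cons_cons, List.map_cons, pvGoB]
    by_cases hb : b <;> simp [hb, ih]

theorem pvGoB_map (vs : List Int) (c : Int) :
    pvGoB (vs.map (fun v => v != 0)) c = pvGo vs c := by
  induction vs generalizing c with
  | nil => simp [pvGoB, pvGo]
  | cons v t ih =>
    by_cases hv : v = 0 <;> simp [pvGoB, pvGo, hv, ih]

theorem pvAlt_main (f : Int → Int → Int → Int) (I J K : Int) :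
    ((((PySem.List.pyRange 0 K 1).flatMap (fun k =>
        (PySem.List.pyRange 0 J 1).flatMap (fun j =>
          (PySem.List.pyRange 0 I 1).map (fun i => f k j i != 0)))).zip
      (((PySem.List.pyRange 0 K 1).flatMap (fun k =>
        (PySem.List.pyRange 0 J 1).flatMap (fun j =>
          (PySem.List.pyRange 0 I 1).map (fun i => f k j i != 0)))).foldl
        (fun (p : List Int × Int) m =>
          (p.1 ++ [p.2 + (if m then 1 else 0)], p.2 + (if m then 1 else 0))) ([], 0)).1).map
      (fun p => if p.1 then p.2 else 0))
    = pvGo ((PySem.List.pyRange 0 K 1).flatMap (fun k =>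
        (PySem.List.pyRange 0 J 1).flatMap (fun j =>
          (PySem.List.pyRange 0 I 1).map (f k j)))) 0 := by
  have hmask : ((PySem.List.pyRange 0 K 1).flatMap (fun k =>
      (PySem.List.pyRange 0 J 1).flatMap (fun j =>
        (PySem.List.pyRange 0 I 1).map (fun i => f k j i != 0))))
      = (((PySem.List.pyRange 0 K 1).flatMap (fun k =>
          (PySem.List.pyRange 0 J 1).flatMap (fun j =>
            (PySem.List.pyRange 0 I 1).map (f k j)))).map (fun v => v != 0)) := by
    simp only [List.map_flatMap, List.map_map]
    rfl
  rw [hmask, pvCum_spec]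
  simp only [List.nil_append]
  rw [pvZipPref, pvGoB_map]

-- ===== VERDICT (by name: the statement is the Claim_ definition above) =====
theorem convert_index_3D_rect_spec : Claim_equal_convert_index_3D_rect := by
  intro D I_max J_max K_max _ _
  unfold Spec_convert_index_3D_rect convert_index_3D_rect convert_index_3D_rect_alt
  by_cases h : 0 < I_max ∧ 0 < J_max ∧ 0 < K_max
  · rw [if_pos h]
    obtain ⟨hI, hJ, hK⟩ := h
    rw [pvMain (fun k j i =>
        PySem.List.pyGetD (PySem.List.pyGetD (PySem.List.pyGetD (PySem.List.pyGetD D 0 []) k []) j []) i 0)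
      I_max J_max K_max hI hJ hK]
    exact (pvAlt_main (fun k j i =>
        PySem.List.pyGetD (PySem.List.pyGetD (PySem.List.pyGetD (PySem.List.pyGetD D 0 []) k []) j []) i 0)
      I_max J_max K_max).symm
  · rw [if_neg h]
    by_cases hK : K_max ≤ 0
    · simp [PySem.List.pyRange_one_eq_nil hK]
    · by_cases hJ : J_max ≤ 0
      · simp only [PySem.List.pyRange_one_eq_nil hJ, List.foldl_nil, pvFoldl_id]
      · have hI : I_max ≤ 0 := by
          by_contra hi
          exact h ⟨by omega, by omega, by omega⟩
        simp only [PySem.List.pyRange_one_eq_nil hI, List.foldl_nil, pvFoldl_id]
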